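-- pv_equiv track=rewrite | github.com/ProVeMo/GALATEA_DDPM_Inpainting | utils_max/FrameConv.py | get_gen_frames_indexed
-- ===== SOURCE A (Python) =====
-- def get_gen_frames_indexed(frames):
--     conv = []
--     frames_ = []
--     for i in range(len(frames)):
--         conv_ = []
--         for j in range(len(frames)):
--             conv_.append(frames[i]+frames[j])
--             frames_.append(frames[i]+frames[j])
--         conv.append(conv_)
--     frames_ = sorted(list(set(frames_)))
--     for i in range (len(conv)):
--         for j in range(len(conv[i])):
--             conv[i][j] = frames_.index(conv[i][j])
--     return conv, frames_
-- ===== SOURCE B (Python) =====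
-- def get_gen_frames_indexed(frames):
--     # sort-and-sweep coordinate compression: flatten all cells into (sum, i, j)
--     # triples, sort them by the sum, then one linear sweep assigns ranks and
--     # writes them into a pre-allocated n x n matrix while collecting the
--     # distinct sums in increasing order.
--     n = len(frames)
--     cells = [(x + y, i, j) for i, x in enumerate(frames) for j, y in enumerate(frames)]
--     cells.sort(key=lambda c: c[0])
--     conv = [[0] * n for _ in range(n)]
--     frames_ = []
--     for s, i, j in cells:
--         if not frames_ or frames_[-1] != s:
--             frames_.append(s)
--         conv[i][j] = len(frames_) - 1
--     return conv, frames_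
-- ===== Notes on version B (the rewrite author's own statement) =====
-- stated objective: faster
-- what changed: A fills the sum matrix with nested index loops and then rewrites every cell by a linear list.index scan into the sorted unique sums; B flattens all cells into (sum,i,j) triples, sorts them once by the sum, and a single linear sweep over the sorted triples assigns the running rank into a pre-allocated n x n matrix while collecting the distinct sums, so no per-cell search exists at all.
import Mathlib
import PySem

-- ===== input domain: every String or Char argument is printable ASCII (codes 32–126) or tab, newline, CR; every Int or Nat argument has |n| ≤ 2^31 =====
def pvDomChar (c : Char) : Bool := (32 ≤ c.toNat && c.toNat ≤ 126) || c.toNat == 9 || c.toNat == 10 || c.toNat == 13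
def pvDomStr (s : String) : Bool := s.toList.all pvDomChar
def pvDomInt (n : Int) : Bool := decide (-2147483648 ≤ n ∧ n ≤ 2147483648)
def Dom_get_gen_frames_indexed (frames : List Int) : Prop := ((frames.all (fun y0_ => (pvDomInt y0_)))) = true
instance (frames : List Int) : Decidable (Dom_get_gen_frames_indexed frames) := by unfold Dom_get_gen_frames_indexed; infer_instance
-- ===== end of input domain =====

-- B replaces A's per-cell linear list.index scan by one global sort of all (sum,i,j)
-- cell triples followed by a single rank-assigning sweep into a pre-allocated matrix
-- (objective: faster).

-- ===== PORT A =====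
-- literal port: two nested index loops accumulating (conv, frames_), then
-- sorted(list(set(frames_))), then every cell replaced by frames_.index(cell).
-- frames[i]/frames[j] are always in range, so pyGetD _ _ 0 is exact; the cell value is
-- always a member of frames_, so (index? …).getD 0 is exact (list.index never raises here).
def get_gen_frames_indexed (frames : List Int) : List (List Int) × List Int :=
  let n : Int := PySem.List.len frames
  let p : List (List Int) × List Int :=
    (PySem.List.pyRange 0 n 1).foldl
      (fun (st : List (List Int) × List Int) i =>
        let q : List Int × List Int :=
          (PySem.List.pyRange 0 n 1).foldl
            (fun (pr : List Int × List Int) j =>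
              (pr.1 ++ [PySem.List.pyGetD frames i 0 + PySem.List.pyGetD frames j 0],
               pr.2 ++ [PySem.List.pyGetD frames i 0 + PySem.List.pyGetD frames j 0]))
            ([], st.2)
        (st.1 ++ [q.1], q.2))
      ([], [])
  let frames_ : List Int := PySem.List.sorted (PySem.Set.ofList p.2) (fun x => x) false
  -- conv[i][j] = frames_.index(conv[i][j]) for every i, j = rewrite of every cell
  let conv : List (List Int) := p.1.map (fun row => row.map (fun v => ((PySem.List.index? frames_ v).getD 0 : Int)))
  (conv, frames_)

-- ===== PORT B =====
-- conv[i][j] = v: the indices are produced by enumerate, hence 0 ≤ i, j < n, so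
-- .toNat and List.set are exact here (no negative or out-of-range write can occur)
def pvSetCell (m : List (List Int)) (i j : Int) (v : Int) : List (List Int) :=
  m.set i.toNat ((m.getD i.toNat []).set j.toNat v)

def get_gen_frames_indexed_alt (frames : List Int) : List (List Int) × List Int :=
  let n : Nat := frames.length
  -- [(x + y, i, j) for i, x in enumerate(frames) for j, y in enumerate(frames)]
  let cells0 : List (Int × Int × Int) :=
    (PySem.List.enumerate frames 0).flatMap (fun p =>
      (PySem.List.enumerate frames 0).map (fun q => (p.2 + q.2, p.1, q.1)))
  -- cells.sort(key=lambda c: c[0])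
  let cells : List (Int × Int × Int) := PySem.List.sorted cells0 (fun c => c.1) false
  -- conv = [[0] * n for _ in range(n)]
  let conv0 : List (List Int) := List.replicate n (List.replicate n (0 : Int))
  -- the sweep: frames_[-1] is PySem.List.pyGet? st.2 (-1) (guarded by the emptiness test)
  cells.foldl
    (fun (st : List (List Int) × List Int) c =>
      let fr : List Int :=
        if st.2.isEmpty || PySem.List.pyGet? st.2 (-1) ≠ some c.1 then st.2 ++ [c.1] else st.2
      (pvSetCell st.1 c.2.1 c.2.2 ((fr.length : Int) - 1), fr))
    (conv0, [])

-- ===== PRECONDITION & SPEC =====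
def Spec_get_gen_frames_indexed (frames : List Int) (out : List (List Int) × List Int) : Prop := out = get_gen_frames_indexed_alt frames
instance (frames : List Int) (out : List (List Int) × List Int) : Decidable (Spec_get_gen_frames_indexed frames out) := by unfold Spec_get_gen_frames_indexed; infer_instance

-- ===== CLAIM (what is proved, stated in full; the proofs are below) =====
def Claim_equal_get_gen_frames_indexed : Prop := ∀ (frames : List Int), Dom_get_gen_frames_indexed frames → Spec_get_gen_frames_indexed frames (get_gen_frames_indexed frames)

-- ===== LEMMAS AND PROOFS =====

-- proof-only abbreviations: the pairwise sums, the sorted distinct sums, ranks, matrix access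
def pvSums (frames : List Int) : List Int := frames.flatMap (fun x => frames.map (fun y => x + y))
def pvU (frames : List Int) : List Int :=
  PySem.List.sorted (PySem.Set.ofList (pvSums frames)) (fun x => x) false
def pvIdx (U : List Int) (v : Int) : Int := ((PySem.List.index? U v).getD 0 : Nat)
def pvGet2 (m : List (List Int)) (ki kj : Nat) : Int := (m.getD ki []).getD kj 0
def pvSq (m : List (List Int)) (n : Nat) : Prop :=
  m.length = n ∧ ∀ t, t < n → (m.getD t []).length = n
def pvStep (st : List (List Int) × List Int) (c : Int × Int × Int) : List (List Int) × List Int :=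
  let fr : List Int :=
    if st.2.isEmpty || PySem.List.pyGet? st.2 (-1) ≠ some c.1 then st.2 ++ [c.1] else st.2
  (pvSetCell st.1 c.2.1 c.2.2 ((fr.length : Int) - 1), fr)
def pvCells (frames : List Int) : List (Int × Int × Int) :=
  (PySem.List.enumerate frames 0).flatMap (fun p =>
    (PySem.List.enumerate frames 0).map (fun q => (p.2 + q.2, p.1, q.1)))

-- A's inner j-loop: appends x + y for each y to both accumulator components
lemma pv_inner_fold (x : Int) (frames : List Int) (c s : List Int) :
    frames.foldl (fun (pr : List Int × List Int) y => (pr.1 ++ [x + y], pr.2 ++ [x + y])) (c, s)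
      = (c ++ frames.map (fun y => x + y), s ++ frames.map (fun y => x + y)) := by
  induction frames generalizing c s with
  | nil => simp
  | cons a t ih => simp [List.foldl, ih]

-- A's outer i-loop, after the inner loop is summarised
lemma pv_outer_fold (frames l : List Int) (acc : List (List Int)) (s : List Int) :
    l.foldl (fun (st : List (List Int) × List Int) x =>
        (st.1 ++ [frames.map (fun y => x + y)], st.2 ++ frames.map (fun y => x + y))) (acc, s)
      = (acc ++ l.map (fun x => frames.map (fun y => x + y)),
         s ++ l.flatMap (fun x => frames.map (fun y => x + y))) := by
  induction l generalizing acc s with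
  | nil => simp
  | cons a t ih => simp [List.foldl, ih]

-- frames_[-1] is the last element
lemma pv_pyGet_neg_one (l : List Int) : PySem.List.pyGet? l (-1) = l.getLast? := by
  cases l with
  | nil => simp [PySem.List.pyGet?, PySem.List.pyIdx?]
  | cons a t =>
    rw [List.getLast?_eq_getElem?]
    simp [PySem.List.pyGet?, PySem.List.pyIdx?]

-- in a strictly increasing list the last element is maximal
lemma pv_le_getLast (fr : List Int) (h : fr.Pairwise (· < ·)) (m : Int) (hm : fr.getLast? = some m) : ∀ x ∈ fr, x ≤ m := by
  induction fr with
  | nil => simp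
  | cons a t ih =>
    rcases List.pairwise_cons.mp h with ⟨ha, ht⟩
    cases t with
    | nil => simp at hm ⊢; omega
    | cons b u =>
      rw [List.getLast?_cons_cons] at hm
      intro x hx
      rcases List.mem_cons.mp hx with rfl | hx'
      · have hbm := ih ht hm b (by simp)
        have hab := ha b (by simp)
        omega
      · exact ih ht hm x hx'

-- index in a strictly sorted list = number of elements ≤ it, minus one
lemma pv_idx_eq_countP (U : List Int) (hU : U.Pairwise (· < ·)) (s : Int) (hs : s ∈ U) :
    (((PySem.List.index? U s).getD 0 : Nat) : Int) = (U.countP (fun u => decide (u ≤ s)) : Int) - 1 := by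
  induction U with
  | nil => cases hs
  | cons a t ih =>
    rcases List.pairwise_cons.mp hU with ⟨ha, ht⟩
    by_cases has : a = s
    · subst has
      rw [PySem.List.index?_cons_self]
      have hzero : t.countP (fun u => decide (u ≤ a)) = 0 := by
        rw [List.countP_eq_zero]
        intro u hu
        have := ha u hu
        simp only [decide_eq_true_eq]
        omega
      simp [hzero]
    · have hst : s ∈ t := (List.mem_cons.mp hs).resolve_left (fun h => has h.symm)
      obtain ⟨k, hk⟩ := Option.isSome_iff_exists.mp ((PySem.List.index?_isSome_iff t s).mpr hst)
      rw [PySem.List.index?_cons_of_ne t has, hk]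
      have has' : a ≤ s := le_of_lt (ha s hst)
      have hih := ih ht hst
      rw [hk] at hih
      simp only [Option.map_some, Option.getD_some, List.countP_cons, has', decide_true] at hih ⊢
      push_cast at hih ⊢
      omega

-- the sweep over the sorted cells: the matrix fold writes exactly the rank of each sum,
-- and the collected list is strictly increasing with exactly the processed sums as members
lemma pv_sweep (U : List Int) (hU : U.Pairwise (· < ·)) :
    ∀ (L : List (Int × Int × Int)) (fr : List Int) (m : List (List Int)),
    fr.Pairwise (· < ·) →
    (∀ x ∈ fr, x ∈ U) →
    (∀ u ∈ U, u ∈ fr ∨ ∃ c ∈ L, c.1 = u) →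
    (∀ x ∈ fr, ∀ c ∈ L, x ≤ c.1) →
    L.Pairwise (fun a b => a.1 ≤ b.1) →
    (∀ c ∈ L, c.1 ∈ U) →
    (L.foldl pvStep (m, fr)).1
        = L.foldl (fun m c => pvSetCell m c.2.1 c.2.2 (pvIdx U c.1)) m
    ∧ (L.foldl pvStep (m, fr)).2.Pairwise (· < ·)
    ∧ (∀ v, v ∈ (L.foldl pvStep (m, fr)).2 ↔ v ∈ fr ∨ ∃ c ∈ L, c.1 = v) := by
  intro L
  induction L with
  | nil =>
    intro fr m h1 h2 h3 h4 h5 h6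
    exact ⟨rfl, h1, by simp⟩
  | cons c rest ih =>
    intro fr m h1 h2 h3 h4 h5 h6
    have hsU : c.1 ∈ U := h6 c List.mem_cons_self
    set fr' : List Int :=
      if fr.isEmpty || PySem.List.pyGet? fr (-1) ≠ some c.1 then fr ++ [c.1] else fr with hfr'
    have hstep : pvStep (m, fr) c = (pvSetCell m c.2.1 c.2.2 ((fr'.length : Int) - 1), fr') := rfl
    have hmem' : ∀ v, v ∈ fr' ↔ v ∈ fr ∨ v = c.1 := by
      rw [hfr']
      split_ifs with hc
      · intro v; simp
      · simp only [Bool.or_eq_true, decide_eq_true_eq, not_or, Bool.not_eq_true] at hc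
        have hlast : fr.getLast? = some c.1 := by
          rw [← pv_pyGet_neg_one]; exact not_not.mp hc.2
        have hin : c.1 ∈ fr := List.mem_of_getLast? hlast
        intro v
        constructor
        · exact fun h => Or.inl h
        · rintro (h | rfl); exact h; exact hin
    have hp' : fr'.Pairwise (· < ·) := by
      rw [hfr']
      split_ifs with hc
      · rw [List.pairwise_append]
        refine ⟨h1, by simp, ?_⟩
        intro x hx y hy
        simp at hy; subst hy
        have hle := h4 x hx c List.mem_cons_self
        rcases lt_or_eq_of_le hle with h | h
        · exact h
        · exfalso
          have hne : fr ≠ [] := List.ne_nil_of_mem hx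
          have hie : fr.isEmpty = false := List.isEmpty_eq_false_iff.mpr hne
          have hlast : fr.getLast? = some (fr.getLast hne) := List.getLast?_eq_some_getLast hne
          have h1' := pv_le_getLast fr h1 _ hlast x hx
          have h2' := h4 _ (List.mem_of_getLast? hlast) c List.mem_cons_self
          have hgl : fr.getLast hne = x := le_antisymm (h ▸ h2') h1'
          rw [hie] at hc
          simp only [Bool.false_or, decide_eq_true_eq] at hc
          exact hc (by rw [pv_pyGet_neg_one, hlast, hgl, h])
      · exact h1
    have hndU : U.Nodup := hU.imp ne_of_lt
    have hnd' : fr'.Nodup := hp'.imp ne_of_lt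
    have hiff : ∀ v, v ∈ fr' ↔ v ∈ U.filter (fun u => decide (u ≤ c.1)) := by
      intro v
      rw [hmem', List.mem_filter]
      constructor
      · rintro (h | rfl)
        · exact ⟨h2 v h, by simp [h4 v h c List.mem_cons_self]⟩
        · exact ⟨hsU, by simp⟩
      · rintro ⟨hvU, hvle⟩
        simp only [decide_eq_true_eq] at hvle
        rcases h3 v hvU with h | ⟨c', hc', hce⟩
        · exact Or.inl h
        · rcases List.mem_cons.mp hc' with rfl | hc'r
          · exact Or.inr hce.symm
          · have hsle := (List.pairwise_cons.mp h5).1 c' hc'r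
            rw [hce] at hsle
            exact Or.inr (le_antisymm hvle hsle)
    have hperm : fr'.Perm (U.filter (fun u => decide (u ≤ c.1))) :=
      (List.perm_ext_iff_of_nodup hnd' (hndU.filter _)).mpr hiff
    have hlen : (fr'.length : Int) - 1 = pvIdx U c.1 := by
      have h := pv_idx_eq_countP U hU c.1 hsU
      rw [List.countP_eq_length_filter] at h
      rw [pvIdx, h, hperm.length_eq]
    have h2' : ∀ x ∈ fr', x ∈ U := by
      intro x hx
      rcases (hmem' x).mp hx with h | rfl
      · exact h2 x h
      · exact hsU
    have h3' : ∀ u ∈ U, u ∈ fr' ∨ ∃ c' ∈ rest, c'.1 = u := by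
      intro u hu
      rcases h3 u hu with h | ⟨c', hc', hce⟩
      · exact Or.inl ((hmem' u).mpr (Or.inl h))
      · rcases List.mem_cons.mp hc' with rfl | hc'r
        · exact Or.inl ((hmem' u).mpr (Or.inr hce.symm))
        · exact Or.inr ⟨c', hc'r, hce⟩
    have h4' : ∀ x ∈ fr', ∀ c' ∈ rest, x ≤ c'.1 := by
      intro x hx c' hc'
      rcases (hmem' x).mp hx with h | rfl
      · exact h4 x h c' (List.mem_cons_of_mem _ hc')
      · exact (List.pairwise_cons.mp h5).1 c' hc'
    obtain ⟨g1, g2, g3⟩ := ih fr' (pvSetCell m c.2.1 c.2.2 ((fr'.length : Int) - 1)) hp' h2' h3' h4'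
      (List.pairwise_cons.mp h5).2 (fun c' hc' => h6 c' (List.mem_cons_of_mem _ hc'))
    refine ⟨?_, ?_, ?_⟩
    · rw [List.foldl_cons, hstep, g1, hlen, List.foldl_cons]
    · rw [List.foldl_cons, hstep]; exact g2
    · intro v
      rw [List.foldl_cons, hstep, g3 v, hmem' v]
      constructor
      · rintro ((h | rfl) | ⟨c', hc', hce⟩)
        · exact Or.inl h
        · exact Or.inr ⟨c, List.mem_cons_self, rfl⟩
        · exact Or.inr ⟨c', List.mem_cons_of_mem _ hc', hce⟩
      · rintro (h | ⟨c', hc', hce⟩)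
        · exact Or.inl (Or.inl h)
        · rcases List.mem_cons.mp hc' with rfl | hc'r
          · exact Or.inl (Or.inr hce.symm)
          · exact Or.inr ⟨c', hc'r, hce⟩

-- shape of a single write
lemma pv_setCell_getD (m : List (List Int)) (i j : Int) (v : Int) (t : Nat) :
    (pvSetCell m i j v).getD t []
      = if t = i.toNat ∧ t < m.length then (m.getD t []).set j.toNat v else m.getD t [] := by
  unfold pvSetCell
  rw [List.getD_eq_getElem?_getD, List.getElem?_set]
  by_cases h1 : i.toNat = t
  · subst h1
    by_cases h2 : i.toNat < m.length
    · rw [if_pos rfl, if_pos h2, if_pos ⟨rfl, h2⟩, Option.getD_some]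
    · rw [if_pos rfl, if_neg h2, if_neg (fun h => h2 h.2)]
      simp [List.getD_eq_getElem?_getD, List.getElem?_eq_none (show m.length ≤ i.toNat by omega)]
  · rw [if_neg h1, if_neg (fun h => h1 h.1.symm), List.getD_eq_getElem?_getD]

lemma pv_setCell_sq (m : List (List Int)) (n : Nat) (i j : Int) (v : Int) (h : pvSq m n) :
    pvSq (pvSetCell m i j v) n := by
  obtain ⟨hl, hr⟩ := h
  refine ⟨by simp [pvSetCell, hl], ?_⟩
  intro t ht
  rw [pv_setCell_getD]
  split_ifs with hc
  · rw [List.length_set]; exact hr t ht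
  · exact hr t ht

lemma pv_fold_sq (g : Int × Int × Int → Int) (n : Nat) :
    ∀ (L : List (Int × Int × Int)) (m : List (List Int)), pvSq m n →
    pvSq (L.foldl (fun m c => pvSetCell m c.2.1 c.2.2 (g c)) m) n := by
  intro L
  induction L with
  | nil => intro m h; exact h
  | cons c rest ih => intro m h; exact ih _ (pv_setCell_sq m n _ _ _ h)

-- a fold of writes that all carry the same value at (ki, kj) leaves exactly that value there
lemma pv_fold_entry (g : Int × Int × Int → Int) (n : Nat) (w : Int) (ki kj : Nat)
    (hki : ki < n) (hkj : kj < n) :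
    ∀ (L : List (Int × Int × Int)) (m : List (List Int)), pvSq m n →
    (∀ c ∈ L, c.2.1.toNat = ki → c.2.2.toNat = kj → g c = w) →
    pvGet2 (L.foldl (fun m c => pvSetCell m c.2.1 c.2.2 (g c)) m) ki kj
      = if ∃ c ∈ L, c.2.1.toNat = ki ∧ c.2.2.toNat = kj then w else pvGet2 m ki kj := by
  intro L
  induction L with
  | nil => intro m _ _; simp
  | cons c rest ih =>
    intro m hsq hval
    rw [List.foldl_cons]
    have hsq' := pv_setCell_sq m n c.2.1 c.2.2 (g c) hsq
    by_cases hm : c.2.1.toNat = ki ∧ c.2.2.toNat = kj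
    · have hw : g c = w := hval c List.mem_cons_self hm.1 hm.2
      have hentry : pvGet2 (pvSetCell m c.2.1 c.2.2 (g c)) ki kj = w := by
        unfold pvGet2
        rw [pv_setCell_getD, hm.1, if_pos ⟨rfl, by rw [hsq.1]; exact hki⟩]
        rw [hm.2, List.getD_eq_getElem?_getD, List.getElem?_set]
        rw [if_pos rfl, if_pos (by rw [hsq.2 ki hki]; exact hkj)]
        simp [hw]
      rw [ih _ hsq' (fun c' hc' => hval c' (List.mem_cons_of_mem _ hc')), hentry]
      conv_rhs => rw [if_pos (show ∃ c' ∈ c :: rest, c'.2.1.toNat = ki ∧ c'.2.2.toNat = kj from ⟨c, List.mem_cons_self, hm⟩)]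
      split_ifs <;> rfl
    · have hentry : pvGet2 (pvSetCell m c.2.1 c.2.2 (g c)) ki kj = pvGet2 m ki kj := by
        unfold pvGet2
        rw [pv_setCell_getD]
        split_ifs with hc
        · have hj : c.2.2.toNat ≠ kj := fun h => hm ⟨hc.1.symm, h⟩
          rw [List.getD_eq_getElem?_getD, List.getElem?_set, if_neg hj]
          simp [List.getD_eq_getElem?_getD]
        · rfl
      rw [ih _ hsq' (fun c' hc' => hval c' (List.mem_cons_of_mem _ hc')), hentry]
      have hiff : (∃ c' ∈ c :: rest, c'.2.1.toNat = ki ∧ c'.2.2.toNat = kj)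
          ↔ (∃ c' ∈ rest, c'.2.1.toNat = ki ∧ c'.2.2.toNat = kj) := by
        constructor
        · rintro ⟨c', hc', hp⟩
          rcases List.mem_cons.mp hc' with rfl | h
          · exact absurd hp hm
          · exact ⟨c', h, hp⟩
        · rintro ⟨c', hc', hp⟩
          exact ⟨c', List.mem_cons_of_mem _ hc', hp⟩
      rw [if_congr hiff rfl rfl]

-- the cell triples are exactly (frames[a]+frames[b], a, b)
lemma pv_mem_cells (frames : List Int) (c : Int × Int × Int) :
    c ∈ pvCells frames ↔ ∃ (a b : Nat) (ha : a < frames.length) (hb : b < frames.length),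
      c = (frames[a] + frames[b], (a : Int), (b : Int)) := by
  unfold pvCells
  rw [List.mem_flatMap]
  constructor
  · rintro ⟨p, hp, hc⟩
    rw [List.mem_map] at hc
    obtain ⟨q, hq, rfl⟩ := hc
    obtain ⟨a, ha, rfl⟩ := (PySem.List.mem_enumerate_iff frames 0 p).mp hp
    obtain ⟨b, hb, rfl⟩ := (PySem.List.mem_enumerate_iff frames 0 q).mp hq
    exact ⟨a, b, ha, hb, by simp⟩
  · rintro ⟨a, b, ha, hb, rfl⟩
    refine ⟨((a : Int), frames[a]), ?_, ?_⟩
    · exact (PySem.List.mem_enumerate_iff frames 0 _).mpr ⟨a, ha, by simp⟩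
    · rw [List.mem_map]
      exact ⟨((b : Int), frames[b]), (PySem.List.mem_enumerate_iff frames 0 _).mpr ⟨b, hb, by simp⟩, rfl⟩

-- the sums carried by the cells are exactly the pairwise sums
lemma pv_map_fst_cells (frames : List Int) :
    (pvCells frames).map (fun c => c.1) = pvSums frames := by
  unfold pvCells pvSums
  rw [List.map_flatMap]
  have hinner : ∀ x : Int,
      (PySem.List.enumerate frames 0).map (fun q => x + q.2) = frames.map (fun y => x + y) := by
    intro x
    conv_rhs => rw [← PySem.List.map_snd_enumerate frames 0]
    rw [List.map_map]
    rfl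
  have houter : ∀ F : Int → List Int,
      (PySem.List.enumerate frames 0).flatMap (fun p => F p.2) = frames.flatMap F := by
    intro F
    conv_rhs => rw [← PySem.List.map_snd_enumerate frames 0]
    rw [List.flatMap_map]
  rw [← houter (fun x => frames.map (fun y => x + y))]
  congr 1
  funext p
  rw [List.map_map, ← hinner p.2]
  rfl

-- ===== VERDICT (by name: the statement is the Claim_ definition above) =====
theorem get_gen_frames_indexed_spec : Claim_equal_get_gen_frames_indexed := by
  intro frames _
  unfold Spec_get_gen_frames_indexed get_gen_frames_indexed get_gen_frames_indexed_alt
  -- summarise A's phase-1 fold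
  have h1 :
      (PySem.List.pyRange 0 (PySem.List.len frames) 1).foldl
        (fun (st : List (List Int) × List Int) i =>
          let q : List Int × List Int :=
            (PySem.List.pyRange 0 (PySem.List.len frames) 1).foldl
              (fun (pr : List Int × List Int) j =>
                (pr.1 ++ [PySem.List.pyGetD frames i 0 + PySem.List.pyGetD frames j 0],
                 pr.2 ++ [PySem.List.pyGetD frames i 0 + PySem.List.pyGetD frames j 0]))
              ([], st.2)
          (st.1 ++ [q.1], q.2))
        ([], []) =
      (frames.map (fun x => frames.map (fun y => x + y)), pvSums frames) := by
    have hin : ∀ (x : Int) (st : List (List Int) × List Int),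
        (PySem.List.pyRange 0 (PySem.List.len frames) 1).foldl
          (fun (pr : List Int × List Int) j => (pr.1 ++ [x + PySem.List.pyGetD frames j 0], pr.2 ++ [x + PySem.List.pyGetD frames j 0]))
          ([], st.2)
          = (frames.map (fun y => x + y), st.2 ++ frames.map (fun y => x + y)) := by
      intro x st
      rw [PySem.List.foldl_pyRange_zero_pyGetD frames 0
        (fun (pr : List Int × List Int) y => (pr.1 ++ [x + y], pr.2 ++ [x + y])) ([], st.2)]
      simpa using pv_inner_fold x frames [] st.2
    calc
      _ = (PySem.List.pyRange 0 (PySem.List.len frames) 1).foldl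
            (fun (st : List (List Int) × List Int) i =>
              (st.1 ++ [frames.map (fun y => PySem.List.pyGetD frames i 0 + y)],
               st.2 ++ frames.map (fun y => PySem.List.pyGetD frames i 0 + y))) ([], []) := by
            apply PySem.List.foldl_congr_mem
            intro st i _
            simp only []
            rw [hin (PySem.List.pyGetD frames i 0) st]
      _ = _ := by
            rw [PySem.List.foldl_pyRange_zero_pyGetD frames 0
              (fun (st : List (List Int) × List Int) x =>
                (st.1 ++ [frames.map (fun y => x + y)], st.2 ++ frames.map (fun y => x + y)))
              ([], [])]
            simpa [pvSums] using pv_outer_fold frames frames [] []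
  simp only [h1]
  -- names for the shared objects
  have hU_pw : (pvU frames).Pairwise (· < ·) :=
    PySem.List.sorted_ofList_pairwise_lt (pvSums frames)
  have hCmem : ∀ c, c ∈ PySem.List.sorted (pvCells frames) (fun c => c.1) false ↔ c ∈ pvCells frames :=
    fun c => PySem.List.mem_sorted (pvCells frames) (fun c => c.1) false c
  have hsum_mem : ∀ c ∈ PySem.List.sorted (pvCells frames) (fun c => c.1) false, c.1 ∈ pvU frames := by
    intro c hc
    rw [pvU, PySem.List.mem_sorted, PySem.Set.mem_ofList, ← pv_map_fst_cells frames]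
    exact List.mem_map_of_mem ((hCmem c).mp hc)
  have hUc : ∀ u ∈ pvU frames, ∃ c ∈ PySem.List.sorted (pvCells frames) (fun c => c.1) false, c.1 = u := by
    intro u hu
    rw [pvU, PySem.List.mem_sorted, PySem.Set.mem_ofList, ← pv_map_fst_cells frames] at hu
    obtain ⟨c, hc, hce⟩ := List.mem_map.mp hu
    exact ⟨c, (hCmem c).mpr hc, hce⟩
  obtain ⟨g1, g2, g3⟩ := pv_sweep (pvU frames) hU_pw
    (PySem.List.sorted (pvCells frames) (fun c => c.1) false) []
    (List.replicate frames.length (List.replicate frames.length (0 : Int)))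
    (by simp) (by simp) (fun u hu => Or.inr (hUc u hu)) (by simp)
    (PySem.List.sorted_pairwise (pvCells frames) (fun c => c.1)) hsum_mem
  -- the B-side fold is literally a fold of pvStep
  show _ = (PySem.List.sorted (pvCells frames) (fun c => c.1) false).foldl pvStep
    (List.replicate frames.length (List.replicate frames.length (0 : Int)), [])
  have hsnd : (pvU frames) = ((PySem.List.sorted (pvCells frames) (fun c => c.1) false).foldl pvStep
      (List.replicate frames.length (List.replicate frames.length (0 : Int)), [])).2 := by
    apply PySem.List.sorted_eq_of_perm_of_pairwise_lt
    · apply (List.perm_ext_iff_of_nodup (g2.imp ne_of_lt) (PySem.Set.nodup_ofList _)).mpr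
      intro v
      rw [g3 v, PySem.Set.mem_ofList, ← pv_map_fst_cells frames]
      constructor
      · rintro (h | ⟨c, hc, hce⟩)
        · cases h
        · exact hce ▸ List.mem_map_of_mem ((hCmem c).mp hc)
      · intro h
        obtain ⟨c, hc, hce⟩ := List.mem_map.mp h
        exact Or.inr ⟨c, (hCmem c).mpr hc, hce⟩
    · exact g2
  have hsq0 : pvSq (List.replicate frames.length (List.replicate frames.length (0 : Int))) frames.length := by
    refine ⟨List.length_replicate, ?_⟩
    intro t ht
    rw [List.getD_replicate _ ht, List.length_replicate]
  have hfst :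
      frames.map (fun x => frames.map (fun y => pvIdx (pvU frames) (x + y)))
        = ((PySem.List.sorted (pvCells frames) (fun c => c.1) false).foldl pvStep
            (List.replicate frames.length (List.replicate frames.length (0 : Int)), [])).1 := by
    rw [g1]
    set M : List (List Int) :=
      (PySem.List.sorted (pvCells frames) (fun c => c.1) false).foldl
        (fun m c => pvSetCell m c.2.1 c.2.2 (pvIdx (pvU frames) c.1))
        (List.replicate frames.length (List.replicate frames.length (0 : Int))) with hM
    have hsqM : pvSq M frames.length := pv_fold_sq (fun c => pvIdx (pvU frames) c.1) frames.length
      (PySem.List.sorted (pvCells frames) (fun c => c.1) false) _ hsq0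
    apply List.ext_getElem
    · rw [List.length_map, hsqM.1]
    intro i hi1 hi2
    have hin : i < frames.length := by rwa [List.length_map] at hi1
    apply List.ext_getElem
    · rw [List.getElem_map, List.length_map, ← List.getD_eq_getElem _ [] hi2, hsqM.2 i hin]
    intro j hj1 hj2
    have hjn : j < frames.length := by
      rw [List.getElem_map, List.length_map] at hj1; exact hj1
    have hw := pv_fold_entry (fun c => pvIdx (pvU frames) c.1) frames.length
      (pvIdx (pvU frames) (frames[i] + frames[j])) i j hin hjn
      (PySem.List.sorted (pvCells frames) (fun c => c.1) false) _ hsq0 ?_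
    · have hex : ∃ c ∈ PySem.List.sorted (pvCells frames) (fun c => c.1) false,
          c.2.1.toNat = i ∧ c.2.2.toNat = j := by
        refine ⟨(frames[i] + frames[j], (i : Int), (j : Int)), ?_, by simp⟩
        exact (hCmem _).mpr ((pv_mem_cells frames _).mpr ⟨i, j, hin, hjn, rfl⟩)
      rw [if_pos hex, ← hM] at hw
      have hconv : pvGet2 M i j = M[i][j] := by
        unfold pvGet2
        rw [List.getD_eq_getElem M [] hi2]
        exact List.getD_eq_getElem _ 0 hj2
      simp only [List.getElem_map]
      rw [← hconv]
      exact hw.symm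
    · intro c hc hci hcj
      obtain ⟨a, b, ha, hb, rfl⟩ := (pv_mem_cells frames c).mp ((hCmem c).mp hc)
      simp only [Int.toNat_natCast] at hci hcj
      subst hci; subst hcj
      rfl
  refine Prod.ext ?_ hsnd
  rw [← hfst]
  simp only [Function.comp_def, List.map_map]
  rfl
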